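-- pv_equiv track=rewrite | github.com/Ssunbell/Algorithm_Study | 25주차/BOJ_1461/BOJ_1461_이승환.py | solution
-- ===== SOURCE A (Python) =====
-- def solution(books,n,m):
--     books = sorted(books,key=abs)
--     len_walk = []
--     neg = []
--     pos = []
--
--     while books:
--         curr = books.pop()
--
--         if curr < 0:
--             neg.append(curr)
--         else:
--             pos.append(curr)
--
--         if len(pos) == m:
--             len_walk.append(abs(max(pos)))
--             pos = []
--         if len(neg) == m:
--             len_walk.append(abs(min(neg)))
--             neg = []
--
--     if not neg:
--         neg_val = 0
--     else:
--         neg_val = abs(min(neg))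
--
--     if not pos:
--         pos_val = 0
--     else:
--         pos_val = abs(max(pos))
--
--     if not len_walk:
--         max_len = max(pos_val, neg_val)
--     else:
--         max_len = max(len_walk)
--
--     answer = (sum(len_walk)*2) - max_len + ((pos_val + neg_val)*2)
--
--     return answer
-- ===== SOURCE B (Python) =====
-- def solution(books, n, m):
--     pos = sorted((x for x in books if x >= 0), reverse=True)
--     neg = sorted((-x for x in books if x < 0), reverse=True)
--     trips = [l[i] for l in (pos, neg) for i in range(0, len(l), m)]
--     return 2 * sum(trips) - max(trips) if trips else 0
-- ===== Notes on version B (the rewrite author's own statement) =====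
-- stated objective: simpler
-- what changed: Replaces A's global abs-sort plus pop-one-at-a-time loop with interleaved fill counters by two per-sign descending sorts and strided selection of every m-th element (each batch's representative), combined by the closed formula 2*sum(trips) - max(trips); the Python-level element loop disappears.
-- intended difference: When full batches exist on one side only and the other (partial) side holds the strictly largest magnitude (e.g. books=[5,-1,-1], m=2), A subtracts only the largest FULL-batch representative (returns 11) while B subtracts the global maximum (returns 7), which is the intended one-way saving on the farthest trip. — e.g. on solution([5, -1, -1], 3, 2): A returns 11, B returns 7
-- outside the precondition, e.g. on solution([1, 2], 2, -1): A returns 2, B returns 0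
import Mathlib
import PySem

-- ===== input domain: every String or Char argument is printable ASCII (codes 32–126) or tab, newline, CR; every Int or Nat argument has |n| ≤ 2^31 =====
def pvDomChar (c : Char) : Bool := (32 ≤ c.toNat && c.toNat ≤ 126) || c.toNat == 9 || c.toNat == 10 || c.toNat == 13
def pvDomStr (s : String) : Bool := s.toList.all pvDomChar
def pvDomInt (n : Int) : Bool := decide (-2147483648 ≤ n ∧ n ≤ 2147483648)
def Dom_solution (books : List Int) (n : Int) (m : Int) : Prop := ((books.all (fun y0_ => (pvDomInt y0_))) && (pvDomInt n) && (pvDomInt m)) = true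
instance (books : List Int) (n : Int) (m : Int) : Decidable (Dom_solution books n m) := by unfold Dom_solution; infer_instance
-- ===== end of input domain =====

-- B replaces A's global abs-sort + pop loop with fill counters by two per-sign descending
-- sorts and strided selection of every m-th element, combined by 2*sum - max (objective: simpler).

-- ===== PORT A =====
-- the 'while books: curr = books.pop()' loop; popping from the back = walking the reversed list.
-- The '.getD 0' defaults on max?/min? are unreachable: the branch fires only when the batch
-- list has length m ≥ 1 (Pre_); for m = 0 Python A raises ValueError there, excluded by Pre_.
def solLoop (m : Int) : List Int → List Int → List Int → List Int → List Int × List Int × List Int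
  | [], len_walk, neg, pos => (len_walk, neg, pos)
  | curr :: rest, len_walk, neg, pos =>
      let neg1 := if curr < 0 then neg ++ [curr] else neg
      let pos1 := if curr < 0 then pos else pos ++ [curr]
      let lw2 := if (pos1.length : Int) = m then len_walk ++ [|(PySem.List.max? pos1 (fun y => y)).getD 0|] else len_walk
      let pos2 := if (pos1.length : Int) = m then [] else pos1
      let lw3 := if (neg1.length : Int) = m then lw2 ++ [|(PySem.List.min? neg1 (fun y => y)).getD 0|] else lw2
      let neg2 := if (neg1.length : Int) = m then [] else neg1
      solLoop m rest lw3 neg2 pos2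

def solution (books : List Int) (n : Int) (m : Int) : Int :=
  let sortedBooks := PySem.List.sorted books (fun b => |b|)
  let r := solLoop m sortedBooks.reverse [] [] []
  let len_walk := r.1
  let neg := r.2.1
  let pos := r.2.2
  let neg_val := if neg = [] then 0 else |(PySem.List.min? neg (fun y => y)).getD 0|
  let pos_val := if pos = [] then 0 else |(PySem.List.max? pos (fun y => y)).getD 0|
  let max_len := if len_walk = [] then max pos_val neg_val else (PySem.List.max? len_walk (fun y => y)).getD 0
  len_walk.sum * 2 - max_len + (pos_val + neg_val) * 2

-- ===== PORT B =====
-- '[l[i] for i in range(0, len(l), m)]'; the pyGetD default 0 is unreachable (indices in range)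
def strided (l : List Int) (m : Int) : List Int :=
  (PySem.List.pyRange 0 (l.length : Int) m).map (fun i => PySem.List.pyGetD l i 0)

def solution_alt (books : List Int) (n : Int) (m : Int) : Int :=
  let pos := PySem.List.sorted (books.filter (fun x => decide (0 ≤ x))) (fun x => x) true
  let neg := PySem.List.sorted ((books.filter (fun x => decide (x < 0))).map (fun x => -x)) (fun x => x) true
  let trips := strided pos m ++ strided neg m
  if trips = [] then 0 else 2 * trips.sum - (PySem.List.max? trips (fun y => y)).getD 0

-- ===== PRECONDITION & SPEC =====
-- Pre_ restricts to the problem's natural batch size m ≥ 1 (BOJ 1461 guarantees 1 ≤ M):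
-- for m = 0 A raises ValueError (max/min of an empty list) on any nonempty books, and B's
-- range(0, len, 0) raises too; for m ≤ 0 where A does return a value (m < 0, or empty books),
-- batching by a non-positive size is outside the natural domain and B naturally returns 0.
def Pre_solution (books : List Int) (n : Int) (m : Int) : Prop := 1 ≤ m
instance (books : List Int) (n : Int) (m : Int) : Decidable (Pre_solution books n m) := by unfold Pre_solution; infer_instance
def pvWitness_solution : List Int × Int × Int := ([1, -2], 2, 1)

-- On inputs where some side has a full batch of m books but the strictly largest magnitude sits
-- on the other, partial-only side, A subtracts only the largest full-batch representative while
-- B subtracts the global maximum magnitude, which is the intended single one-way trip saving.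
def D_solution (books : List Int) (n : Int) (m : Int) : Prop :=
  let (pos, neg) := books.partition (fun x => 0 ≤ x)
  let p := pos.max?.getD 0
  let q := -(neg.min?.getD 0)
  (m.toNat ≤ pos.length ∧ neg.length < m.toNat ∧ p < q) ∨
  (m.toNat ≤ neg.length ∧ pos.length < m.toNat ∧ q < p)
instance (books : List Int) (n : Int) (m : Int) : Decidable (D_solution books n m) := by unfold D_solution; infer_instance

def Spec_solution (books : List Int) (n : Int) (m : Int) (out : Int) : Prop := ¬ D_solution books n m → out = solution_alt books n m
instance (books : List Int) (n : Int) (m : Int) (out : Int) : Decidable (Spec_solution books n m out) := by unfold Spec_solution; infer_instance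

def pvDiffWitness_solution : List Int × Int × Int := ([5, -1, -1], 3, 2)
def pvDiffWitnessOut_solution : Int × Int := (11, 7)

-- ===== CLAIM (what is proved, stated in full; the proofs are below) =====
def Claim_unchanged_solution : Prop := ∀ (books : List Int) (n : Int) (m : Int), Dom_solution books n m → Pre_solution books n m → Spec_solution books n m (solution books n m)
def Claim_changed_solution : Prop := Dom_solution (pvDiffWitness_solution.1) (pvDiffWitness_solution.2.1) (pvDiffWitness_solution.2.2) ∧ Pre_solution (pvDiffWitness_solution.1) (pvDiffWitness_solution.2.1) (pvDiffWitness_solution.2.2) ∧ D_solution (pvDiffWitness_solution.1) (pvDiffWitness_solution.2.1) (pvDiffWitness_solution.2.2) ∧ solution (pvDiffWitness_solution.1) (pvDiffWitness_solution.2.1) (pvDiffWitness_solution.2.2) = pvDiffWitnessOut_solution.1 ∧ solution_alt (pvDiffWitness_solution.1) (pvDiffWitness_solution.2.1) (pvDiffWitness_solution.2.2) = pvDiffWitnessOut_solution.2 ∧ pvDiffWitnessOut_solution.1 ≠ pvDiffWitnessOut_solution.2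
def Claim_exact_solution : Prop := ∀ (books : List Int) (n : Int) (m : Int), Dom_solution books n m → Pre_solution books n m → D_solution books n m → solution books n m ≠ solution_alt books n m

-- ===== LEMMAS AND PROOFS =====

-- proof-side helpers: batch representatives of a list processed in m-sized blocks
def headD0 : List Int → Int
  | [] => 0
  | x :: _ => x

def headList : List Int → List Int
  | [] => []
  | x :: _ => [x]

def fullReps (m : Nat) : List Int → List Int
  | [] => []
  | x :: rest => if m ≤ rest.length + 1 then x :: fullReps m (rest.drop (m - 1)) else []
  termination_by l => l.length
  decreasing_by simp

def partBlock (m : Nat) : List Int → List Int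
  | [] => []
  | x :: rest => if m ≤ rest.length + 1 then partBlock m (rest.drop (m - 1)) else x :: rest
  termination_by l => l.length
  decreasing_by simp

def allReps (m : Nat) : List Int → List Int
  | [] => []
  | x :: rest => x :: allReps m (rest.drop (m - 1))
  termination_by l => l.length
  decreasing_by simp

def maxVal (l : List Int) : Int := (PySem.List.max? l (fun y => y)).getD 0

-- the two independent per-side accumulations hidden inside A's single loop
def posFold (m : Int) : List Int → List Int × List Int → List Int × List Int
  | [], st => st
  | x :: rest, st =>
      let cur1 := st.2 ++ [x]
      if (cur1.length : Int) = m then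
        posFold m rest (st.1 ++ [|(PySem.List.max? cur1 (fun y => y)).getD 0|], [])
      else posFold m rest (st.1, cur1)

def negFold (m : Int) : List Int → List Int × List Int → List Int × List Int
  | [], st => st
  | x :: rest, st =>
      let cur1 := st.2 ++ [x]
      if (cur1.length : Int) = m then
        negFold m rest (st.1 ++ [|(PySem.List.min? cur1 (fun y => y)).getD 0|], [])
      else negFold m rest (st.1, cur1)

-- ===== generic facts about maxVal =====
theorem maxVal_eq_of {l : List Int} {x : Int} (hx : x ∈ l) (hle : ∀ y ∈ l, y ≤ x) :
    maxVal l = x := by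
  unfold maxVal
  cases hmax : PySem.List.max? l (fun y => y) with
  | none =>
      rw [PySem.List.max?_eq_none_iff] at hmax; subst hmax; cases hx
  | some v =>
      have hv := PySem.List.max?_mem hmax
      have h1 := PySem.List.max?_isMax hmax x hx
      simp only [Option.getD_some]
      exact le_antisymm (hle v hv) (by simpa using h1)

theorem maxVal_perm {l₁ l₂ : List Int} (h : l₁.Perm l₂) : maxVal l₁ = maxVal l₂ := by
  cases hl : PySem.List.max? l₁ (fun y => y) with
  | none =>
      have h1 : l₁ = [] := (PySem.List.max?_eq_none_iff _ _).mp hl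
      have h2 : l₂ = [] := by subst h1; exact h.symm.eq_nil
      have h3 : PySem.List.max? l₂ (fun y => y) = none := (PySem.List.max?_eq_none_iff _ _).mpr h2
      rw [maxVal, maxVal, hl, h3]
  | some v =>
      have hv := PySem.List.max?_mem hl
      have hmax := PySem.List.max?_isMax hl
      have h2 : maxVal l₂ = v :=
        maxVal_eq_of (h.subset hv) (fun y hy => by simpa using hmax y (h.symm.subset hy))
      rw [maxVal, hl, h2]; rfl

-- ===== pyRange / strided =====
theorem pyRange_nonpos {b m : Int} (hm : 0 < m) (hb : b ≤ 0) :
    PySem.List.pyRange 0 b m = [] := by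
  rw [PySem.List.pyRange_of_pos _ _ hm, if_neg (by omega)]; simp

theorem pyRange_cons_pos (a b : Int) {s : Int} (hs : 0 < s) (hab : a < b) :
    PySem.List.pyRange a b s = a :: PySem.List.pyRange (a + s) b s := by
  rw [PySem.List.pyRange_of_pos _ _ hs, PySem.List.pyRange_of_pos _ _ hs, if_pos hab]
  have hdiv : (b - a + s - 1 - s) / s = (b - a + s - 1) / s - 1 := by
    have := Int.add_mul_ediv_right (b - a + s - 1) (-1) (by omega : s ≠ 0)
    have he : b - a + s - 1 + -1 * s = b - a + s - 1 - s := by ring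
    rw [he] at this; omega
  have hge1 : 1 ≤ (b - a + s - 1) / s := by
    rw [Int.le_ediv_iff_mul_le hs]; omega
  have hn : ((b - a + s - 1) / s).toNat
      = (if a + s < b then ((b - (a + s) + s - 1) / s).toNat else 0) + 1 := by
    by_cases hab2 : a + s < b
    · rw [if_pos hab2]
      have he : b - (a + s) + s - 1 = b - a + s - 1 - s := by ring
      rw [he, hdiv]; omega
    · rw [if_neg hab2]
      have hlt : (b - a + s - 1) / s < 2 := by
        rw [Int.ediv_lt_iff_lt_mul hs]; omega
      omega
  rw [hn, List.range_succ_eq_map, List.map_cons, List.map_map]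
  congr 1
  · simp
  · apply List.map_congr_left; intro k _; simp; ring

theorem pyRange_shift_step (L : Int) {m : Int} (hm : 0 < m) :
    PySem.List.pyRange m L m = (PySem.List.pyRange 0 (L - m) m).map (fun k => k + m) := by
  rw [PySem.List.pyRange_of_pos _ _ hm, PySem.List.pyRange_of_pos _ _ hm, List.map_map]
  have hcount : (if m < L then ((L - m + m - 1) / m).toNat else 0)
      = (if 0 < L - m then ((L - m - 0 + m - 1) / m).toNat else 0) := by
    have he : L - m - 0 + m - 1 = L - m + m - 1 := by ring
    rw [he]
    by_cases h : m < L
    · rw [if_pos h, if_pos (by omega)]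
    · rw [if_neg h, if_neg (by omega)]
  rw [hcount]
  apply List.map_congr_left; intro k _; simp; ring

theorem strided_cons {m : Int} (hm : 1 ≤ m) (x : Int) (rest : List Int) :
    strided (x :: rest) m = x :: strided (rest.drop (m.toNat - 1)) m := by
  have hm0 : (0:Int) < m := by omega
  unfold strided
  have hL : (0:Int) < ((x :: rest).length : Int) := by
    exact_mod_cast Nat.succ_pos rest.length
  rw [pyRange_cons_pos 0 _ hm0 hL, List.map_cons]
  congr 1
  · rw [PySem.List.pyGetD_of_nonneg _ _ (le_refl (0:Int))]; rfl
  · rw [zero_add, pyRange_shift_step _ hm0, List.map_map]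
    have hdrop : rest.drop (m.toNat - 1) = (x :: rest).drop m.toNat := by
      have h1 : m.toNat = (m.toNat - 1) + 1 := by omega
      conv_rhs => rw [h1]
      rw [List.drop_succ_cons]
    rw [hdrop]
    by_cases hML : m ≤ ((x :: rest).length : Int)
    · have hlen : ((((x :: rest).drop m.toNat).length : Nat) : Int) = ((x :: rest).length : Int) - m := by
        rw [List.length_drop]; omega
      rw [hlen]
      apply List.map_congr_left
      intro k hk
      have hk' := (PySem.List.mem_pyRange_iff_of_pos hm0 k).mp hk
      simp only [Function.comp]
      rw [PySem.List.pyGetD_of_nonneg _ _ (by omega : (0:Int) ≤ k + m),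
          PySem.List.pyGetD_of_nonneg _ _ (by omega : (0:Int) ≤ k)]
      rw [List.getD_eq_getElem?_getD, List.getD_eq_getElem?_getD, List.getElem?_drop]
      congr 2
      omega
    · have h1 : ((x :: rest).length : Int) - m ≤ 0 := by omega
      rw [pyRange_nonpos hm0 h1]
      have h2 : (x :: rest).drop m.toNat = [] := by
        rw [List.drop_eq_nil_iff]; omega
      rw [h2]
      have h3 : (((([]:List Int)).length : Nat) : Int) = 0 := by simp
      rw [h3, pyRange_nonpos hm0 (le_refl 0)]
      simp

theorem strided_eq_allReps {m : Int} (hm : 1 ≤ m) :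
    ∀ (fuel : Nat) (l : List Int), l.length ≤ fuel → strided l m = allReps m.toNat l := by
  intro fuel
  induction fuel with
  | zero =>
      intro l hl
      have h0 : l = [] := by
        cases l with
        | nil => rfl
        | cons a t => simp at hl
      subst h0
      unfold strided
      rw [show ((([]:List Int)).length : Int) = 0 from by simp,
          pyRange_nonpos (by omega : (0:Int) < m) (le_refl 0)]
      simp [allReps]
  | succ fuel ih =>
      intro l hl
      cases l with
      | nil =>
          unfold strided
          rw [show ((([]:List Int)).length : Int) = 0 from by simp,
              pyRange_nonpos (by omega : (0:Int) < m) (le_refl 0)]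
          simp [allReps]
      | cons x rest =>
          rw [strided_cons hm, allReps]
          congr 1
          apply ih
          have := List.length_drop (l := rest) (i := m.toNat - 1)
          simp at hl
          omega

-- ===== structure of fullReps / partBlock / allReps =====
theorem allReps_split {mN : Nat} (hm : 1 ≤ mN) :
    ∀ (fuel : Nat) (l : List Int), l.length ≤ fuel →
      allReps mN l = fullReps mN l ++ headList (partBlock mN l) := by
  intro fuel
  induction fuel with
  | zero =>
      intro l hl
      have h0 : l = [] := by cases l with
        | nil => rfl
        | cons a t => simp at hl
      subst h0; simp [allReps, fullReps, partBlock, headList]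
  | succ fuel ih =>
      intro l hl
      cases l with
      | nil => simp [allReps, fullReps, partBlock, headList]
      | cons x rest =>
          by_cases h : mN ≤ rest.length + 1
          · rw [allReps, fullReps, partBlock, if_pos h, if_pos h, List.cons_append]
            congr 1
            apply ih
            have := List.length_drop (l := rest) (i := mN - 1)
            simp at hl; omega
          · rw [allReps, fullReps, partBlock, if_neg h, if_neg h]
            have hd : rest.drop (mN - 1) = [] := by
              rw [List.drop_eq_nil_iff]; omega
            rw [hd]
            simp [allReps, headList]

theorem mem_fullReps {mN : Nat} :
    ∀ (fuel : Nat) (l : List Int), l.length ≤ fuel → ∀ x ∈ fullReps mN l, x ∈ l := by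
  intro fuel
  induction fuel with
  | zero =>
      intro l hl x hx
      cases l with
      | nil => simp [fullReps] at hx
      | cons a t => simp at hl
  | succ fuel ih =>
      intro l hl x hx
      cases l with
      | nil => simp [fullReps] at hx
      | cons a t =>
          rw [fullReps] at hx
          by_cases h : mN ≤ t.length + 1
          · rw [if_pos h] at hx
            rcases List.mem_cons.mp hx with rfl | hx2
            · exact List.mem_cons_self
            · have := ih (t.drop (mN - 1)) (by
                have := List.length_drop (l := t) (i := mN - 1); simp at hl; omega) x hx2
              exact List.mem_cons_of_mem _ (List.mem_of_mem_drop this)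
          · rw [if_neg h] at hx; cases hx

theorem mem_partBlock {mN : Nat} :
    ∀ (fuel : Nat) (l : List Int), l.length ≤ fuel → ∀ x ∈ partBlock mN l, x ∈ l := by
  intro fuel
  induction fuel with
  | zero =>
      intro l hl x hx
      cases l with
      | nil => simp [partBlock] at hx
      | cons a t => simp at hl
  | succ fuel ih =>
      intro l hl x hx
      cases l with
      | nil => simp [partBlock] at hx
      | cons a t =>
          rw [partBlock] at hx
          by_cases h : mN ≤ t.length + 1
          · rw [if_pos h] at hx
            have := ih (t.drop (mN - 1)) (by
              have := List.length_drop (l := t) (i := mN - 1); simp at hl; omega) x hx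
            exact List.mem_cons_of_mem _ (List.mem_of_mem_drop this)
          · rw [if_neg h] at hx; exact hx

theorem pairwise_partBlock {mN : Nat} {R : Int → Int → Prop} :
    ∀ (fuel : Nat) (l : List Int), l.length ≤ fuel → l.Pairwise R →
      (partBlock mN l).Pairwise R := by
  intro fuel
  induction fuel with
  | zero =>
      intro l hl hp
      cases l with
      | nil => simpa [partBlock] using hp
      | cons a t => simp at hl
  | succ fuel ih =>
      intro l hl hp
      cases l with
      | nil => simpa [partBlock] using hp
      | cons a t =>
          rw [partBlock]
          by_cases h : mN ≤ t.length + 1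
          · rw [if_pos h]
            apply ih
            · have := List.length_drop (l := t) (i := mN - 1); simp at hl; omega
            · exact List.Pairwise.sublist (List.drop_sublist _ _) (List.Pairwise.of_cons hp)
          · rw [if_neg h]; exact hp

theorem fullReps_eq_nil_iff {mN : Nat} (hm : 1 ≤ mN) (l : List Int) :
    fullReps mN l = [] ↔ l.length < mN := by
  cases l with
  | nil => simp [fullReps]; omega
  | cons a t =>
      rw [fullReps]
      by_cases h : mN ≤ t.length + 1
      · rw [if_pos h]; simp; omega
      · rw [if_neg h]; simp; omega

theorem partBlock_of_short {mN : Nat} {l : List Int} (h : l.length < mN) :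
    partBlock mN l = l := by
  cases l with
  | nil => simp [partBlock]
  | cons a t =>
      rw [partBlock, if_neg (by simp at h ⊢; omega)]

theorem allReps_eq_nil_iff {mN : Nat} (l : List Int) : allReps mN l = [] ↔ l = [] := by
  cases l with
  | nil => simp [allReps]
  | cons a t => simp [allReps]

theorem fullReps_map (mN : Nat) (f : Int → Int) :
    ∀ (fuel : Nat) (l : List Int), l.length ≤ fuel →
      fullReps mN (l.map f) = (fullReps mN l).map f := by
  intro fuel
  induction fuel with
  | zero =>
      intro l hl
      cases l with
      | nil => simp [fullReps]
      | cons a t => simp at hl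
  | succ fuel ih =>
      intro l hl
      cases l with
      | nil => simp [fullReps]
      | cons a t =>
          rw [List.map_cons, fullReps, fullReps, List.length_map]
          by_cases h : mN ≤ t.length + 1
          · rw [if_pos h, if_pos h, List.map_cons, ← List.map_drop,
                ih (t.drop (mN - 1)) (by
                  have := List.length_drop (l := t) (i := mN - 1); simp at hl; omega)]
          · rw [if_neg h, if_neg h]; rfl

theorem partBlock_map (mN : Nat) (f : Int → Int) :
    ∀ (fuel : Nat) (l : List Int), l.length ≤ fuel →
      partBlock mN (l.map f) = (partBlock mN l).map f := by
  intro fuel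
  induction fuel with
  | zero =>
      intro l hl
      cases l with
      | nil => simp [partBlock]
      | cons a t => simp at hl
  | succ fuel ih =>
      intro l hl
      cases l with
      | nil => simp [partBlock]
      | cons a t =>
          rw [List.map_cons, partBlock, partBlock, List.length_map]
          by_cases h : mN ≤ t.length + 1
          · rw [if_pos h, if_pos h, ← List.map_drop,
                ih (t.drop (mN - 1)) (by
                  have := List.length_drop (l := t) (i := mN - 1); simp at hl; omega)]
          · rw [if_neg h, if_neg h]; rfl

-- ===== the per-side folds =====
theorem posFold_acc (m : Int) :
    ∀ (l cur w : List Int),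
      posFold m l (w, cur) = (w ++ (posFold m l ([], cur)).1, (posFold m l ([], cur)).2) := by
  intro l
  induction l with
  | nil => intro cur w; simp [posFold]
  | cons x rest ih =>
      intro cur w
      simp only [posFold]
      by_cases h : ((cur ++ [x]).length : Int) = m
      · rw [if_pos h, if_pos h,
            ih [] (w ++ [|(PySem.List.max? (cur ++ [x]) (fun y => y)).getD 0|]),
            ih [] ([] ++ [|(PySem.List.max? (cur ++ [x]) (fun y => y)).getD 0|])]
        simp
      · rw [if_neg h, if_neg h, ih (cur ++ [x]) w]

theorem negFold_acc (m : Int) :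
    ∀ (l cur w : List Int),
      negFold m l (w, cur) = (w ++ (negFold m l ([], cur)).1, (negFold m l ([], cur)).2) := by
  intro l
  induction l with
  | nil => intro cur w; simp [negFold]
  | cons x rest ih =>
      intro cur w
      simp only [negFold]
      by_cases h : ((cur ++ [x]).length : Int) = m
      · rw [if_pos h, if_pos h,
            ih [] (w ++ [|(PySem.List.min? (cur ++ [x]) (fun y => y)).getD 0|]),
            ih [] ([] ++ [|(PySem.List.min? (cur ++ [x]) (fun y => y)).getD 0|])]
        simp
      · rw [if_neg h, if_neg h, ih (cur ++ [x]) w]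

theorem posFold_small {m : Int} :
    ∀ (l cur w : List Int), ((cur.length : Int) + l.length) < m →
      posFold m l (w, cur) = (w, cur ++ l) := by
  intro l
  induction l with
  | nil => intro cur w h; simp [posFold]
  | cons x rest ih =>
      intro cur w h
      simp only [posFold]
      rw [if_neg (by simp at h ⊢; omega)]
      rw [ih (cur ++ [x]) w (by simp at h ⊢; omega)]
      simp

theorem negFold_small {m : Int} :
    ∀ (l cur w : List Int), ((cur.length : Int) + l.length) < m →
      negFold m l (w, cur) = (w, cur ++ l) := by
  intro l
  induction l with
  | nil => intro cur w h; simp [negFold]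
  | cons x rest ih =>
      intro cur w h
      simp only [negFold]
      rw [if_neg (by simp at h ⊢; omega)]
      rw [ih (cur ++ [x]) w (by simp at h ⊢; omega)]
      simp

theorem posFold_take {m : Int} (hm : 1 ≤ m) :
    ∀ (l cur w : List Int), (cur.length : Int) < m → m ≤ (cur.length : Int) + l.length →
      posFold m l (w, cur) =
        posFold m (l.drop (m.toNat - cur.length))
          (w ++ [|(PySem.List.max? (cur ++ l.take (m.toNat - cur.length)) (fun y => y)).getD 0|], []) := by
  intro l
  induction l with
  | nil => intro cur w h1 h2; exfalso; simp at h2; omega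
  | cons x rest ih =>
      intro cur w h1 h2
      simp only [posFold]
      by_cases h : ((cur ++ [x]).length : Int) = m
      · rw [if_pos h]
        have hk : m.toNat - cur.length = 1 := by simp at h; omega
        rw [hk]
        have e2 : (x :: rest).drop 1 = rest := by simp
        have e3 : (x :: rest).take 1 = [x] := by simp
        rw [e2, e3]
      · rw [if_neg h]
        have hc : (cur.length : Int) + 1 < m := by
          simp at h; omega
        rw [ih (cur ++ [x]) w (by simp; omega) (by simp at h2 ⊢; omega)]
        have e1 : m.toNat - (cur ++ [x]).length = m.toNat - cur.length - 1 := by simp; omega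
        rw [e1]
        have hsplit : m.toNat - cur.length = (m.toNat - cur.length - 1) + 1 := by omega
        have e2 : rest.drop (m.toNat - cur.length - 1) = (x :: rest).drop (m.toNat - cur.length) := by
          conv_rhs => rw [hsplit]
          rw [List.drop_succ_cons]
        have e3 : (cur ++ [x]) ++ rest.take (m.toNat - cur.length - 1)
            = cur ++ (x :: rest).take (m.toNat - cur.length) := by
          conv_rhs => rw [hsplit]
          rw [List.take_succ_cons]
          simp
        rw [e2, e3]

theorem negFold_take {m : Int} (hm : 1 ≤ m) :
    ∀ (l cur w : List Int), (cur.length : Int) < m → m ≤ (cur.length : Int) + l.length →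
      negFold m l (w, cur) =
        negFold m (l.drop (m.toNat - cur.length))
          (w ++ [|(PySem.List.min? (cur ++ l.take (m.toNat - cur.length)) (fun y => y)).getD 0|], []) := by
  intro l
  induction l with
  | nil => intro cur w h1 h2; exfalso; simp at h2; omega
  | cons x rest ih =>
      intro cur w h1 h2
      simp only [negFold]
      by_cases h : ((cur ++ [x]).length : Int) = m
      · rw [if_pos h]
        have hk : m.toNat - cur.length = 1 := by simp at h; omega
        rw [hk]
        have e2 : (x :: rest).drop 1 = rest := by simp
        have e3 : (x :: rest).take 1 = [x] := by simp
        rw [e2, e3]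
      · rw [if_neg h]
        have hc : (cur.length : Int) + 1 < m := by
          simp at h; omega
        rw [ih (cur ++ [x]) w (by simp; omega) (by simp at h2 ⊢; omega)]
        have e1 : m.toNat - (cur ++ [x]).length = m.toNat - cur.length - 1 := by simp; omega
        rw [e1]
        have hsplit : m.toNat - cur.length = (m.toNat - cur.length - 1) + 1 := by omega
        have e2 : rest.drop (m.toNat - cur.length - 1) = (x :: rest).drop (m.toNat - cur.length) := by
          conv_rhs => rw [hsplit]
          rw [List.drop_succ_cons]
        have e3 : (cur ++ [x]) ++ rest.take (m.toNat - cur.length - 1)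
            = cur ++ (x :: rest).take (m.toNat - cur.length) := by
          conv_rhs => rw [hsplit]
          rw [List.take_succ_cons]
          simp
        rw [e2, e3]

theorem minVal_eq_of {l : List Int} {x : Int} (hx : x ∈ l) (hge : ∀ y ∈ l, x ≤ y) :
    (PySem.List.min? l (fun y => y)).getD 0 = x := by
  cases hmin : PySem.List.min? l (fun y => y) with
  | none =>
      rw [PySem.List.min?_eq_none_iff] at hmin; subst hmin; cases hx
  | some v =>
      have hv := PySem.List.min?_mem hmin
      have h1 := PySem.List.min?_isMin hmin x hx
      simp only [Option.getD_some]
      exact le_antisymm (by simpa using h1) (hge v hv)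

theorem posFold_run {m : Int} (hm : 1 ≤ m) :
    ∀ (fuel : Nat) (l w : List Int), l.length ≤ fuel → l.Pairwise (· ≥ ·) → (∀ x ∈ l, 0 ≤ x) →
      posFold m l (w, []) = (w ++ fullReps m.toNat l, partBlock m.toNat l) := by
  intro fuel
  induction fuel with
  | zero =>
      intro l w hl hp h0
      have h : l = [] := by
        cases l with
        | nil => rfl
        | cons a t => simp at hl
      subst h
      simp [posFold, fullReps, partBlock]
  | succ fuel ih =>
      intro l w hl hp h0
      by_cases hlen : (l.length : Int) < m
      · rw [posFold_small l [] w (by simpa using hlen)]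
        rw [(fullReps_eq_nil_iff (by omega) l).mpr (by omega),
            partBlock_of_short (show l.length < m.toNat by omega)]
        simp
      · rw [Int.not_lt] at hlen
        rw [posFold_take hm l [] w (by simp; omega) (by simpa using hlen)]
        simp only [List.length_nil, Nat.sub_zero, List.nil_append]
        cases l with
        | nil => simp at hlen; omega
        | cons x rest =>
            have hsplit : m.toNat = (m.toNat - 1) + 1 := by omega
            have htake : (x :: rest).take m.toNat = x :: rest.take (m.toNat - 1) := by
              conv_lhs => rw [hsplit]
              rw [List.take_succ_cons]
            have hrep : (PySem.List.max? ((x :: rest).take m.toNat) (fun y => y)).getD 0 = x := by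
              rw [htake]
              show maxVal _ = x
              apply maxVal_eq_of (List.mem_cons_self)
              intro y hy
              rcases List.mem_cons.mp hy with rfl | hy2
              · exact le_refl _
              · exact List.rel_of_pairwise_cons hp (List.mem_of_mem_take hy2)
            have habs : |(PySem.List.max? ((x :: rest).take m.toNat) (fun y => y)).getD 0| = x := by
              rw [hrep]; exact abs_of_nonneg (h0 x List.mem_cons_self)
            rw [habs]
            have hdrop : (x :: rest).drop m.toNat = rest.drop (m.toNat - 1) := by
              conv_lhs => rw [hsplit]
              rw [List.drop_succ_cons]
            rw [hdrop]
            rw [ih (rest.drop (m.toNat - 1)) (w ++ [x])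
                (by have := List.length_drop (l := rest) (i := m.toNat - 1); simp at hl; omega)
                (List.Pairwise.sublist (List.drop_sublist _ _) (List.Pairwise.of_cons hp))
                (fun y hy => h0 y (List.mem_cons_of_mem _ (List.mem_of_mem_drop hy)))]
            have hfull : fullReps m.toNat (x :: rest) = x :: fullReps m.toNat (rest.drop (m.toNat - 1)) := by
              rw [fullReps, if_pos (by simp at hlen; omega)]
            have hpart : partBlock m.toNat (x :: rest) = partBlock m.toNat (rest.drop (m.toNat - 1)) := by
              rw [partBlock, if_pos (by simp at hlen; omega)]
            rw [hfull, hpart]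
            simp

theorem negFold_run {m : Int} (hm : 1 ≤ m) :
    ∀ (fuel : Nat) (l w : List Int), l.length ≤ fuel → l.Pairwise (· ≤ ·) → (∀ x ∈ l, x < 0) →
      negFold m l (w, []) = (w ++ (fullReps m.toNat l).map (fun v => -v), partBlock m.toNat l) := by
  intro fuel
  induction fuel with
  | zero =>
      intro l w hl hp h0
      have h : l = [] := by
        cases l with
        | nil => rfl
        | cons a t => simp at hl
      subst h
      simp [negFold, fullReps, partBlock]
  | succ fuel ih =>
      intro l w hl hp h0
      by_cases hlen : (l.length : Int) < m
      · rw [negFold_small l [] w (by simpa using hlen)]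
        rw [(fullReps_eq_nil_iff (by omega) l).mpr (by omega),
            partBlock_of_short (show l.length < m.toNat by omega)]
        simp
      · rw [Int.not_lt] at hlen
        rw [negFold_take hm l [] w (by simp; omega) (by simpa using hlen)]
        simp only [List.length_nil, Nat.sub_zero, List.nil_append]
        cases l with
        | nil => simp at hlen; omega
        | cons x rest =>
            have hsplit : m.toNat = (m.toNat - 1) + 1 := by omega
            have htake : (x :: rest).take m.toNat = x :: rest.take (m.toNat - 1) := by
              conv_lhs => rw [hsplit]
              rw [List.take_succ_cons]
            have hrep : (PySem.List.min? ((x :: rest).take m.toNat) (fun y => y)).getD 0 = x := by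
              rw [htake]
              apply minVal_eq_of (List.mem_cons_self)
              intro y hy
              rcases List.mem_cons.mp hy with rfl | hy2
              · exact le_refl _
              · exact List.rel_of_pairwise_cons hp (List.mem_of_mem_take hy2)
            have habs : |(PySem.List.min? ((x :: rest).take m.toNat) (fun y => y)).getD 0| = (-x) := by
              rw [hrep]; exact abs_of_neg (h0 x List.mem_cons_self)
            rw [habs]
            have hdrop : (x :: rest).drop m.toNat = rest.drop (m.toNat - 1) := by
              conv_lhs => rw [hsplit]
              rw [List.drop_succ_cons]
            rw [hdrop]
            rw [ih (rest.drop (m.toNat - 1)) (w ++ [(-x)])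
                (by have := List.length_drop (l := rest) (i := m.toNat - 1); simp at hl; omega)
                (List.Pairwise.sublist (List.drop_sublist _ _) (List.Pairwise.of_cons hp))
                (fun y hy => h0 y (List.mem_cons_of_mem _ (List.mem_of_mem_drop hy)))]
            have hfull : (fullReps m.toNat (x :: rest)).map (fun v => -v)
                = (-x) :: (fullReps m.toNat (rest.drop (m.toNat - 1))).map (fun v => -v) := by
              rw [fullReps, if_pos (by simp at hlen; omega), List.map_cons]
            have hpart : partBlock m.toNat (x :: rest) = partBlock m.toNat (rest.drop (m.toNat - 1)) := by
              rw [partBlock, if_pos (by simp at hlen; omega)]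
            rw [hfull, hpart]
            simp

-- ===== A's loop decomposes into the two independent side folds =====
theorem solLoop_decomp {m : Int} (hm : 1 ≤ m) :
    ∀ (s lw ng ps : List Int), (ng.length : Int) < m → (ps.length : Int) < m →
      (solLoop m s lw ng ps).1.Perm
          (lw ++ (posFold m (s.filter (fun x => !decide (x < 0))) ([], ps)).1
              ++ (negFold m (s.filter (fun x => decide (x < 0))) ([], ng)).1)
        ∧ (solLoop m s lw ng ps).2.1 = (negFold m (s.filter (fun x => decide (x < 0))) ([], ng)).2
        ∧ (solLoop m s lw ng ps).2.2 = (posFold m (s.filter (fun x => !decide (x < 0))) ([], ps)).2 := by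
  intro s
  induction s with
  | nil =>
      intro lw ng ps hng hps
      refine ⟨?_, rfl, rfl⟩
      simp [solLoop, posFold, negFold]
  | cons x rest ih =>
      intro lw ng ps hng hps
      have hfn : (x :: rest).filter (fun x => decide (x < 0))
          = if x < 0 then x :: rest.filter (fun x => decide (x < 0))
            else rest.filter (fun x => decide (x < 0)) := by
        by_cases hx : x < 0 <;> simp [List.filter_cons, hx]
      have hfp : (x :: rest).filter (fun x => !decide (x < 0))
          = if x < 0 then rest.filter (fun x => !decide (x < 0))
            else x :: rest.filter (fun x => !decide (x < 0)) := by
        by_cases hx : x < 0 <;> simp [List.filter_cons, hx]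
      by_cases hx : x < 0
      · -- negative element: only the neg side advances
        rw [hfn, if_pos hx, hfp, if_pos hx]
        simp only [solLoop]
        rw [if_pos hx, if_pos hx]
        rw [if_neg (show ¬ ((ps.length : Int) = m) by omega),
            if_neg (show ¬ ((ps.length : Int) = m) by omega)]
        by_cases hfull : ((ng ++ [x]).length : Int) = m
        · rw [if_pos hfull, if_pos hfull]
          obtain ⟨hperm, hng', hps'⟩ :=
            ih (lw ++ [|(PySem.List.min? (ng ++ [x]) (fun y => y)).getD 0|]) [] ps
              (by simp; omega) hps
          refine ⟨?_, ?_, ?_⟩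
          · simp only [negFold]
            rw [if_pos hfull]
            rw [negFold_acc m (rest.filter (fun x => decide (x < 0))) []
                ([] ++ [|(PySem.List.min? (ng ++ [x]) (fun y => y)).getD 0|])]
            refine hperm.trans ?_
            set r := |(PySem.List.min? (ng ++ [x]) (fun y => y)).getD 0| with hr
            set P := (posFold m (rest.filter (fun x => !decide (x < 0))) ([], ps)).1 with hP
            set Y := (negFold m (rest.filter (fun x => decide (x < 0))) ([], [])).1 with hY
            have h1 : lw ++ [r] ++ P ++ Y = lw ++ (r :: (P ++ Y)) := by simp
            have h2 : lw ++ P ++ ([] ++ [r] ++ Y) = lw ++ (P ++ r :: Y) := by simp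
            rw [h1, h2]
            exact List.Perm.append_left lw List.perm_middle.symm
          · simp only [negFold]
            rw [if_pos hfull]
            rw [negFold_acc m (rest.filter (fun x => decide (x < 0))) []
                ([] ++ [|(PySem.List.min? (ng ++ [x]) (fun y => y)).getD 0|])]
            exact hng'
          · exact hps'
        · rw [if_neg hfull, if_neg hfull]
          obtain ⟨hperm, hng', hps'⟩ :=
            ih lw (ng ++ [x]) ps (by simp at hfull ⊢; omega) hps
          refine ⟨?_, ?_, ?_⟩
          · simp only [negFold]
            rw [if_neg hfull]
            exact hperm
          · simp only [negFold]
            rw [if_neg hfull]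
            exact hng'
          · exact hps'
      · -- nonnegative element: only the pos side advances
        rw [hfn, if_neg hx, hfp, if_neg hx]
        simp only [solLoop]
        rw [if_neg hx, if_neg hx]
        by_cases hfull : ((ps ++ [x]).length : Int) = m
        · rw [if_pos hfull, if_pos hfull]
          rw [if_neg (show ¬ ((ng.length : Int) = m) by omega),
              if_neg (show ¬ ((ng.length : Int) = m) by omega)]
          obtain ⟨hperm, hng', hps'⟩ :=
            ih (lw ++ [|(PySem.List.max? (ps ++ [x]) (fun y => y)).getD 0|]) ng []
              hng (by simp; omega)
          refine ⟨?_, ?_, ?_⟩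
          · simp only [posFold]
            rw [if_pos hfull]
            rw [posFold_acc m (rest.filter (fun x => !decide (x < 0))) []
                ([] ++ [|(PySem.List.max? (ps ++ [x]) (fun y => y)).getD 0|])]
            refine hperm.trans ?_
            simp
          · exact hng'
          · simp only [posFold]
            rw [if_pos hfull]
            rw [posFold_acc m (rest.filter (fun x => !decide (x < 0))) []
                ([] ++ [|(PySem.List.max? (ps ++ [x]) (fun y => y)).getD 0|])]
            exact hps'
        · rw [if_neg hfull, if_neg hfull]
          rw [if_neg (show ¬ ((ng.length : Int) = m) by omega),
              if_neg (show ¬ ((ng.length : Int) = m) by omega)]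
          obtain ⟨hperm, hng', hps'⟩ :=
            ih lw ng (ps ++ [x]) hng (by simp at hfull ⊢; omega)
          refine ⟨?_, ?_, ?_⟩
          · simp only [posFold]
            rw [if_neg hfull]
            exact hperm
          · exact hng'
          · simp only [posFold]
            rw [if_neg hfull]
            exact hps' 

-- ===== the two sorted per-sign sequences coincide =====
theorem posSeq_eq (books : List Int) :
    (PySem.List.sorted books (fun b => |b|)).reverse.filter (fun x => !decide (x < 0))
      = PySem.List.sorted (books.filter (fun x => decide (0 ≤ x))) (fun x => x) true := by
  apply List.Perm.eq_of_pairwise (le := fun a b : Int => b ≤ a)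
  · intro a b _ _ h1 h2; exact le_antisymm h2 h1
  · have h1 := PySem.List.sorted_pairwise books (fun b => |b|)
    have h2 : ((PySem.List.sorted books (fun b => |b|)).reverse).Pairwise (fun a b => |b| ≤ |a|) :=
      List.pairwise_reverse.mpr h1
    have h3 := h2.filter (fun x => !decide (x < 0))
    refine List.Pairwise.imp_of_mem ?_ h3
    intro a b ha hb hab
    have ha0 : 0 ≤ a := by have := List.of_mem_filter ha; simp at this; omega
    have hb0 : 0 ≤ b := by have := List.of_mem_filter hb; simp at this; omega
    rwa [abs_of_nonneg ha0, abs_of_nonneg hb0] at hab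
  · exact (PySem.List.sorted_pairwise_rev _ _)
  · have p1 : ((PySem.List.sorted books (fun b => |b|)).reverse.filter (fun x => !decide (x < 0))).Perm
        (books.filter (fun x => !decide (x < 0))) :=
      ((List.reverse_perm _).trans (PySem.List.sorted_perm _ _ _)).filter _
    have hpred : books.filter (fun x => !decide (x < 0)) = books.filter (fun x => decide (0 ≤ x)) := by
      apply List.filter_congr
      intro x _
      by_cases h : x < 0
      · simp [h]
      · simp [h]; omega
    rw [hpred] at p1
    exact p1.trans (PySem.List.sorted_perm _ _ _).symm

theorem negSeq_eq (books : List Int) :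
    ((PySem.List.sorted books (fun b => |b|)).reverse.filter (fun x => decide (x < 0))).map (fun v => -v)
      = PySem.List.sorted ((books.filter (fun x => decide (x < 0))).map (fun x => -x)) (fun x => x) true := by
  apply List.Perm.eq_of_pairwise (le := fun a b : Int => b ≤ a)
  · intro a b _ _ h1 h2; exact le_antisymm h2 h1
  · have h1 := PySem.List.sorted_pairwise books (fun b => |b|)
    have h2 : ((PySem.List.sorted books (fun b => |b|)).reverse).Pairwise (fun a b => |b| ≤ |a|) :=
      List.pairwise_reverse.mpr h1
    have h3 := h2.filter (fun x => decide (x < 0))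
    rw [List.pairwise_map]
    refine List.Pairwise.imp_of_mem ?_ h3
    intro a b ha hb hab
    have ha0 : a < 0 := by have := List.of_mem_filter ha; simpa using this
    have hb0 : b < 0 := by have := List.of_mem_filter hb; simpa using this
    rw [abs_of_neg ha0, abs_of_neg hb0] at hab
    omega
  · exact (PySem.List.sorted_pairwise_rev _ _)
  · have p1 : ((PySem.List.sorted books (fun b => |b|)).reverse.filter (fun x => decide (x < 0))).Perm
        (books.filter (fun x => decide (x < 0))) :=
      ((List.reverse_perm _).trans (PySem.List.sorted_perm _ _ _)).filter _
    exact (p1.map _).trans (PySem.List.sorted_perm _ _ _).symm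

-- ===== abstract values of the two programs over the per-sign descending lists =====
def Aval (mN : Nat) (pm nm : List Int) : Int :=
  (fullReps mN pm ++ (fullReps mN nm)).sum * 2
    - (if fullReps mN pm ++ fullReps mN nm = [] then
         max (headD0 (partBlock mN pm)) (headD0 (partBlock mN nm))
       else maxVal (fullReps mN pm ++ fullReps mN nm))
    + (headD0 (partBlock mN pm) + headD0 (partBlock mN nm)) * 2

def Bval (mN : Nat) (pm nm : List Int) : Int :=
  if allReps mN pm ++ allReps mN nm = [] then 0
  else 2 * (allReps mN pm ++ allReps mN nm).sum - maxVal (allReps mN pm ++ allReps mN nm)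

theorem head_dominates {l : List Int} (h : l.Pairwise (· ≥ ·)) : ∀ y ∈ l, y ≤ headD0 l := by
  cases l with
  | nil => intro y hy; cases hy
  | cons x t =>
      intro y hy
      rcases List.mem_cons.mp hy with rfl | hyt
      · exact le_refl _
      · exact List.rel_of_pairwise_cons h hyt

theorem headD0_nonneg {l : List Int} (h : ∀ x ∈ l, 0 ≤ x) : 0 ≤ headD0 l := by
  cases l with
  | nil => simp [headD0]
  | cons x t => exact h x (List.mem_cons_self)

theorem mem_allReps {mN : Nat} :
    ∀ (fuel : Nat) (l : List Int), l.length ≤ fuel → ∀ x ∈ allReps mN l, x ∈ l := by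
  intro fuel
  induction fuel with
  | zero =>
      intro l hl x hx
      cases l with
      | nil => simp [allReps] at hx
      | cons a t => simp at hl
  | succ fuel ih =>
      intro l hl x hx
      cases l with
      | nil => simp [allReps] at hx
      | cons a t =>
          rw [allReps] at hx
          rcases List.mem_cons.mp hx with rfl | hx2
          · exact List.mem_cons_self
          · have := ih (t.drop (mN - 1)) (by
              have := List.length_drop (l := t) (i := mN - 1); simp at hl; omega) x hx2
            exact List.mem_cons_of_mem _ (List.mem_of_mem_drop this)

theorem headD0_mem_fullReps {mN : Nat} {l : List Int} (hlen : mN ≤ l.length) (hm : 1 ≤ mN) :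
    headD0 l ∈ fullReps mN l := by
  cases l with
  | nil => simp at hlen; omega
  | cons x rest =>
      rw [fullReps, if_pos (by simp at hlen ⊢; omega)]
      exact List.mem_cons_self

theorem headD0_mem_allReps {mN : Nat} {l : List Int} (hne : l ≠ []) :
    headD0 l ∈ allReps mN l := by
  cases l with
  | nil => exact absurd rfl hne
  | cons x rest => rw [allReps]; exact List.mem_cons_self

theorem maxVal_trips {mN : Nat} (hm : 1 ≤ mN) (pm nm : List Int)
    (hpmP : pm.Pairwise (· ≥ ·)) (hnmP : nm.Pairwise (· ≥ ·))
    (hpm0 : ∀ x ∈ pm, 0 ≤ x) (hnm0 : ∀ x ∈ nm, 0 ≤ x)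
    (hne : allReps mN pm ++ allReps mN nm ≠ []) :
    maxVal (allReps mN pm ++ allReps mN nm) = max (headD0 pm) (headD0 nm) := by
  apply maxVal_eq_of
  · by_cases hp : pm = []
    · have hnmne : nm ≠ [] := by
        intro hnm; apply hne
        rw [(allReps_eq_nil_iff pm).mpr hp, (allReps_eq_nil_iff nm).mpr hnm]
        rfl
      have h0 : headD0 pm = 0 := by rw [hp]; rfl
      have hle : headD0 pm ≤ headD0 nm := by
        rw [h0]; exact headD0_nonneg hnm0
      rw [max_eq_right hle]
      exact List.mem_append.mpr (Or.inr (headD0_mem_allReps hnmne))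
    · by_cases hn : nm = []
      · have h0 : headD0 nm = 0 := by rw [hn]; rfl
        have hle : headD0 nm ≤ headD0 pm := by
          rw [h0]; exact headD0_nonneg hpm0
        rw [max_eq_left hle]
        exact List.mem_append.mpr (Or.inl (headD0_mem_allReps hp))
      · rcases le_total (headD0 pm) (headD0 nm) with hle | hle
        · rw [max_eq_right hle]
          exact List.mem_append.mpr (Or.inr (headD0_mem_allReps hn))
        · rw [max_eq_left hle]
          exact List.mem_append.mpr (Or.inl (headD0_mem_allReps hp))
  · intro y hy
    rcases List.mem_append.mp hy with h | h
    · exact le_trans (head_dominates hpmP y (mem_allReps pm.length pm le_rfl y h)) (le_max_left _ _)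
    · exact le_trans (head_dominates hnmP y (mem_allReps nm.length nm le_rfl y h)) (le_max_right _ _)

theorem pm_nonneg (books : List Int) :
    ∀ x ∈ PySem.List.sorted (books.filter (fun x => decide (0 ≤ x))) (fun x => x) true, 0 ≤ x := by
  intro x hx
  have h1 : x ∈ books.filter (fun x => decide (0 ≤ x)) := ((PySem.List.mem_sorted _ _ _ _).mp hx)
  have := List.of_mem_filter h1
  simpa using this

theorem nm_nonneg (books : List Int) :
    ∀ x ∈ PySem.List.sorted ((books.filter (fun x => decide (x < 0))).map (fun x => -x)) (fun x => x) true,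
      0 ≤ x := by
  intro x hx
  have h1 : x ∈ (books.filter (fun x => decide (x < 0))).map (fun x => -x) := (PySem.List.mem_sorted _ _ _ _).mp hx
  obtain ⟨y, hy, rfl⟩ := List.mem_map.mp h1
  have := List.of_mem_filter hy
  simp at this
  omega

theorem A_eq_Aval (books : List Int) (n m : Int) (hm : 1 ≤ m) :
    solution books n m =
      Aval m.toNat (PySem.List.sorted (books.filter (fun x => decide (0 ≤ x))) (fun x => x) true)
        (PySem.List.sorted ((books.filter (fun x => decide (x < 0))).map (fun x => -x)) (fun x => x) true) := by
  have hm0 : (0:Int) < m := by omega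
  set pm := PySem.List.sorted (books.filter (fun x => decide (0 ≤ x))) (fun x => x) true with hpmdef
  set nm := PySem.List.sorted ((books.filter (fun x => decide (x < 0))).map (fun x => -x)) (fun x => x) true with hnmdef
  set la := (PySem.List.sorted books (fun b => |b|)).reverse.filter (fun x => decide (x < 0)) with hladef
  have hseqN : la.map (fun v => -v) = nm := negSeq_eq books
  have hpmP : pm.Pairwise (· ≥ ·) := (PySem.List.sorted_pairwise_rev _ _).imp (fun h => h)
  have hpm0 : ∀ x ∈ pm, 0 ≤ x := pm_nonneg books
  have hnmP : nm.Pairwise (· ≥ ·) := (PySem.List.sorted_pairwise_rev _ _).imp (fun h => h)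
  have hlaP : la.Pairwise (· ≤ ·) := by
    have h1 := PySem.List.sorted_pairwise books (fun b => |b|)
    have h2 : ((PySem.List.sorted books (fun b => |b|)).reverse).Pairwise (fun a b => |b| ≤ |a|) :=
      List.pairwise_reverse.mpr h1
    have h3 := h2.filter (fun x => decide (x < 0))
    refine List.Pairwise.imp_of_mem ?_ h3
    intro a b ha hb hab
    have ha0 : a < 0 := by have := List.of_mem_filter ha; simpa using this
    have hb0 : b < 0 := by have := List.of_mem_filter hb; simpa using this
    rw [abs_of_neg ha0, abs_of_neg hb0] at hab
    omega
  have hla0 : ∀ x ∈ la, x < 0 := fun x hx => by simpa using List.of_mem_filter hx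
  obtain ⟨hperm, hng, hps⟩ :=
    solLoop_decomp hm ((PySem.List.sorted books (fun b => |b|)).reverse) [] [] []
      (by simp; omega) (by simp; omega)
  rw [posSeq_eq books] at hperm hps
  rw [← hpmdef] at hperm hps
  rw [← hladef] at hperm hng
  rw [posFold_run hm pm.length pm [] le_rfl hpmP hpm0] at hperm hps
  rw [negFold_run hm la.length la [] le_rfl hlaP hla0] at hperm hng
  simp only [List.nil_append] at hperm hng hps
  have hmapF : (fullReps m.toNat la).map (fun v => -v) = fullReps m.toNat nm := by
    rw [← hseqN, fullReps_map m.toNat _ la.length la le_rfl]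
  have hmapP : (partBlock m.toNat la).map (fun v => -v) = partBlock m.toNat nm := by
    rw [← hseqN, partBlock_map m.toNat _ la.length la le_rfl]
  rw [hmapF] at hperm
  set r := solLoop m ((PySem.List.sorted books (fun b => |b|)).reverse) [] [] [] with hrdef
  have hsol : solution books n m =
      r.1.sum * 2
        - (if r.1 = [] then
             max (if r.2.2 = [] then 0 else |(PySem.List.max? r.2.2 (fun y => y)).getD 0|)
                 (if r.2.1 = [] then 0 else |(PySem.List.min? r.2.1 (fun y => y)).getD 0|)
           else (PySem.List.max? r.1 (fun y => y)).getD 0)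
        + ((if r.2.2 = [] then 0 else |(PySem.List.max? r.2.2 (fun y => y)).getD 0|)
           + (if r.2.1 = [] then 0 else |(PySem.List.min? r.2.1 (fun y => y)).getD 0|)) * 2 := rfl
  have hposval : (if r.2.2 = [] then 0 else |(PySem.List.max? r.2.2 (fun y => y)).getD 0|)
      = headD0 (partBlock m.toNat pm) := by
    rw [hps]
    cases hq : partBlock m.toNat pm with
    | nil => simp [headD0]
    | cons y t =>
        rw [if_neg (by simp)]
        have hpw : (partBlock m.toNat pm).Pairwise (· ≥ ·) :=
          pairwise_partBlock pm.length pm le_rfl hpmP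
        rw [hq] at hpw
        have hval : maxVal (y :: t) = y :=
          maxVal_eq_of List.mem_cons_self (head_dominates hpw)
        unfold maxVal at hval
        rw [hval, headD0]
        exact abs_of_nonneg (hpm0 y
          (mem_partBlock pm.length pm le_rfl y (by rw [hq]; exact List.mem_cons_self)))
  have hnegval : (if r.2.1 = [] then 0 else |(PySem.List.min? r.2.1 (fun y => y)).getD 0|)
      = headD0 (partBlock m.toNat nm) := by
    rw [hng, ← hmapP]
    cases hq : partBlock m.toNat la with
    | nil => simp [headD0]
    | cons y t =>
        rw [if_neg (by simp)]
        have hpw : (partBlock m.toNat la).Pairwise (· ≤ ·) :=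
          pairwise_partBlock la.length la le_rfl hlaP
        rw [hq] at hpw
        have hy0 : y < 0 :=
          hla0 y (mem_partBlock la.length la le_rfl y (by rw [hq]; exact List.mem_cons_self))
        have hval : (PySem.List.min? (y :: t) (fun y => y)).getD 0 = y := by
          apply minVal_eq_of List.mem_cons_self
          intro z hz
          rcases List.mem_cons.mp hz with rfl | hz2
          · exact le_refl _
          · exact List.rel_of_pairwise_cons hpw hz2
        rw [hval, List.map_cons, headD0]
        exact abs_of_neg hy0
  have hsum : r.1.sum = (fullReps m.toNat pm ++ fullReps m.toNat nm).sum := hperm.sum_eq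
  have hnil : (r.1 = []) ↔ (fullReps m.toNat pm ++ fullReps m.toNat nm = []) := by
    constructor
    · intro h; rw [h] at hperm; exact hperm.symm.eq_nil
    · intro h; rw [h] at hperm; exact hperm.eq_nil
  have hmaxlw := maxVal_perm hperm
  unfold maxVal at hmaxlw
  rw [hsol, hposval, hnegval, hsum]
  unfold Aval
  by_cases hc : fullReps m.toNat pm ++ fullReps m.toNat nm = []
  · rw [if_pos (hnil.mpr hc), if_pos hc]
  · rw [if_neg (fun h => hc (hnil.mp h)), if_neg hc, hmaxlw]
    rfl

theorem B_eq_Bval (books : List Int) (n m : Int) (hm : 1 ≤ m) :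
    solution_alt books n m =
      Bval m.toNat (PySem.List.sorted (books.filter (fun x => decide (0 ≤ x))) (fun x => x) true)
        (PySem.List.sorted ((books.filter (fun x => decide (x < 0))).map (fun x => -x)) (fun x => x) true) := by
  show (if _ = ([]:List Int) then (0:Int) else _) = _
  unfold Bval
  rw [strided_eq_allReps hm _ _ le_rfl, strided_eq_allReps hm _ _ le_rfl]
  rfl

theorem final_eq {m : Int} (hm : 1 ≤ m) (pm nm : List Int)
    (hpmP : pm.Pairwise (· ≥ ·)) (hnmP : nm.Pairwise (· ≥ ·))
    (hpm0 : ∀ x ∈ pm, 0 ≤ x) (hnm0 : ∀ x ∈ nm, 0 ≤ x)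
    (hD : ¬ ((m ≤ (pm.length : Int) ∧ (nm.length : Int) < m ∧ headD0 pm < headD0 nm) ∨
             (m ≤ (nm.length : Int) ∧ (pm.length : Int) < m ∧ headD0 nm < headD0 pm))) :
    Aval m.toNat pm nm = Bval m.toNat pm nm := by
  have hmN : 1 ≤ m.toNat := by omega
  unfold Aval Bval
  by_cases htrips : allReps m.toNat pm ++ allReps m.toNat nm = []
  · rw [if_pos htrips]
    obtain ⟨hp, hn⟩ := List.append_eq_nil_iff.mp htrips
    have hpm : pm = [] := (allReps_eq_nil_iff pm).mp hp
    have hnm : nm = [] := (allReps_eq_nil_iff nm).mp hn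
    subst hpm hnm
    simp [fullReps, partBlock, headD0]
  · rw [if_neg htrips]
    have hsumT : (allReps m.toNat pm ++ allReps m.toNat nm).sum
        = (fullReps m.toNat pm ++ fullReps m.toNat nm).sum
          + (headD0 (partBlock m.toNat pm) + headD0 (partBlock m.toNat nm)) := by
      rw [allReps_split hmN pm.length pm le_rfl, allReps_split hmN nm.length nm le_rfl]
      have e1 : ∀ P : List Int, (headList P).sum = headD0 P := by
        intro P; cases P <;> simp [headList, headD0]
      simp only [List.sum_append, e1]
      ring
    have hmaxT := maxVal_trips hmN pm nm hpmP hnmP hpm0 hnm0 htrips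
    rw [hsumT, hmaxT]
    by_cases hfull : fullReps m.toNat pm ++ fullReps m.toNat nm = []
    · rw [if_pos hfull]
      obtain ⟨hp, hn⟩ := List.append_eq_nil_iff.mp hfull
      have hP1 : partBlock m.toNat pm = pm :=
        partBlock_of_short ((fullReps_eq_nil_iff hmN pm).mp hp)
      have hP2 : partBlock m.toNat nm = nm :=
        partBlock_of_short ((fullReps_eq_nil_iff hmN nm).mp hn)
      rw [hp, hn, hP1, hP2]
      simp
      ring
    · rw [if_neg hfull]
      have hmaxF : maxVal (fullReps m.toNat pm ++ fullReps m.toNat nm)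
          = max (headD0 pm) (headD0 nm) := by
        by_cases h1 : m.toNat ≤ pm.length
        · by_cases h2 : m.toNat ≤ nm.length
          · apply maxVal_eq_of
            · rcases le_total (headD0 pm) (headD0 nm) with hle | hle
              · rw [max_eq_right hle]
                exact List.mem_append.mpr (Or.inr (headD0_mem_fullReps h2 hmN))
              · rw [max_eq_left hle]
                exact List.mem_append.mpr (Or.inl (headD0_mem_fullReps h1 hmN))
            · intro y hy
              rcases List.mem_append.mp hy with h | h
              · exact le_trans (head_dominates hpmP y (mem_fullReps pm.length pm le_rfl y h))
                  (le_max_left _ _)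
              · exact le_trans (head_dominates hnmP y (mem_fullReps nm.length nm le_rfl y h))
                  (le_max_right _ _)
          · have hF2 : fullReps m.toNat nm = [] := (fullReps_eq_nil_iff hmN nm).mpr (by omega)
            have hcond : headD0 nm ≤ headD0 pm := by
              by_contra hcon
              exact hD (Or.inl ⟨by omega, by omega, by omega⟩)
            rw [hF2, List.append_nil, max_eq_left hcond]
            apply maxVal_eq_of (headD0_mem_fullReps h1 hmN)
            intro y hy
            exact head_dominates hpmP y (mem_fullReps pm.length pm le_rfl y hy)
        · have hF1 : fullReps m.toNat pm = [] := (fullReps_eq_nil_iff hmN pm).mpr (by omega)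
          have h2 : m.toNat ≤ nm.length := by
            by_contra h2n
            have hF2 : fullReps m.toNat nm = [] := (fullReps_eq_nil_iff hmN nm).mpr (by omega)
            exact hfull (by rw [hF1, hF2]; rfl)
          have hcond : headD0 pm ≤ headD0 nm := by
            by_contra hcon
            exact hD (Or.inr ⟨by omega, by omega, by omega⟩)
          rw [hF1, List.nil_append, max_eq_right hcond]
          apply maxVal_eq_of (headD0_mem_fullReps h2 hmN)
          intro y hy
          exact head_dominates hnmP y (mem_fullReps nm.length nm le_rfl y hy)
      rw [hmaxF]
      ring

theorem final_ne {m : Int} (hm : 1 ≤ m) (pm nm : List Int)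
    (hpmP : pm.Pairwise (· ≥ ·)) (hnmP : nm.Pairwise (· ≥ ·))
    (hpm0 : ∀ x ∈ pm, 0 ≤ x) (hnm0 : ∀ x ∈ nm, 0 ≤ x)
    (hD : (m ≤ (pm.length : Int) ∧ (nm.length : Int) < m ∧ headD0 pm < headD0 nm) ∨
          (m ≤ (nm.length : Int) ∧ (pm.length : Int) < m ∧ headD0 nm < headD0 pm)) :
    Aval m.toNat pm nm ≠ Bval m.toNat pm nm := by
  have hmN : 1 ≤ m.toNat := by omega
  unfold Aval Bval
  rcases hD with ⟨h1, h2, h3⟩ | ⟨h1, h2, h3⟩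
  · -- full batches on the pos side only; nm holds the strict global max
    have h1' : m.toNat ≤ pm.length := by omega
    have hF1ne : fullReps m.toNat pm ≠ [] := by
      intro h; have := (fullReps_eq_nil_iff hmN pm).mp h; omega
    have hF2 : fullReps m.toNat nm = [] := (fullReps_eq_nil_iff hmN nm).mpr (by omega)
    have hpmne : pm ≠ [] := by
      intro h; rw [h] at h1'; simp at h1'; omega
    have htrips : allReps m.toNat pm ++ allReps m.toNat nm ≠ [] := by
      intro h
      obtain ⟨hp, _⟩ := List.append_eq_nil_iff.mp h
      exact hpmne ((allReps_eq_nil_iff pm).mp hp)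
    rw [if_neg htrips]
    have hsumT : (allReps m.toNat pm ++ allReps m.toNat nm).sum
        = (fullReps m.toNat pm ++ fullReps m.toNat nm).sum
          + (headD0 (partBlock m.toNat pm) + headD0 (partBlock m.toNat nm)) := by
      rw [allReps_split hmN pm.length pm le_rfl, allReps_split hmN nm.length nm le_rfl]
      have e1 : ∀ P : List Int, (headList P).sum = headD0 P := by
        intro P; cases P <;> simp [headList, headD0]
      simp only [List.sum_append, e1]
      ring
    have hmaxT := maxVal_trips hmN pm nm hpmP hnmP hpm0 hnm0 htrips
    have hfullne : fullReps m.toNat pm ++ fullReps m.toNat nm ≠ [] := by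
      rw [hF2, List.append_nil]; exact hF1ne
    rw [if_neg hfullne]
    have hmaxF : maxVal (fullReps m.toNat pm ++ fullReps m.toNat nm) = headD0 pm := by
      rw [hF2, List.append_nil]
      apply maxVal_eq_of (headD0_mem_fullReps h1' hmN)
      intro y hy
      exact head_dominates hpmP y (mem_fullReps pm.length pm le_rfl y hy)
    rw [hsumT, hmaxT, hmaxF, max_eq_right (le_of_lt h3)]
    omega
  · -- symmetric: full batches on the neg side only; pm holds the strict global max
    have h1' : m.toNat ≤ nm.length := by omega
    have hF2ne : fullReps m.toNat nm ≠ [] := by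
      intro h; have := (fullReps_eq_nil_iff hmN nm).mp h; omega
    have hF1 : fullReps m.toNat pm = [] := (fullReps_eq_nil_iff hmN pm).mpr (by omega)
    have hnmne : nm ≠ [] := by
      intro h; rw [h] at h1'; simp at h1'; omega
    have htrips : allReps m.toNat pm ++ allReps m.toNat nm ≠ [] := by
      intro h
      obtain ⟨_, hn⟩ := List.append_eq_nil_iff.mp h
      exact hnmne ((allReps_eq_nil_iff nm).mp hn)
    rw [if_neg htrips]
    have hsumT : (allReps m.toNat pm ++ allReps m.toNat nm).sum
        = (fullReps m.toNat pm ++ fullReps m.toNat nm).sum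
          + (headD0 (partBlock m.toNat pm) + headD0 (partBlock m.toNat nm)) := by
      rw [allReps_split hmN pm.length pm le_rfl, allReps_split hmN nm.length nm le_rfl]
      have e1 : ∀ P : List Int, (headList P).sum = headD0 P := by
        intro P; cases P <;> simp [headList, headD0]
      simp only [List.sum_append, e1]
      ring
    have hmaxT := maxVal_trips hmN pm nm hpmP hnmP hpm0 hnm0 htrips
    have hfullne : fullReps m.toNat pm ++ fullReps m.toNat nm ≠ [] := by
      rw [hF1, List.nil_append]; exact hF2ne
    rw [if_neg hfullne]
    have hmaxF : maxVal (fullReps m.toNat pm ++ fullReps m.toNat nm) = headD0 nm := by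
      rw [hF1, List.nil_append]
      apply maxVal_eq_of (headD0_mem_fullReps h1' hmN)
      intro y hy
      exact head_dominates hnmP y (mem_fullReps nm.length nm le_rfl y hy)
    rw [hsumT, hmaxT, hmaxF, max_eq_left (le_of_lt h3)]
    omega

-- bridge from D_solution (stated on the raw partition) to the sorted lists
theorem max?_getD_eq_headD0 {l pm : List Int} (h : l.Perm pm)
    (hP : pm.Pairwise (· ≥ ·)) :
    l.max?.getD 0 = headD0 pm := by
  cases hpm : pm with
  | nil =>
      have hl : l = [] := by rw [hpm] at h; exact h.eq_nil
      rw [hl]; rfl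
  | cons x t =>
      rw [hpm] at h hP
      have hx : l.max? = some x := by
        rw [List.max?_eq_some_iff]
        exact ⟨h.symm.subset List.mem_cons_self,
          fun b hb => head_dominates hP b (h.subset hb)⟩
      rw [hx]; rfl

theorem neg_min?_getD_eq_headD0 {l nm : List Int} (h : (l.map (fun x => -x)).Perm nm)
    (hP : nm.Pairwise (· ≥ ·)) :
    -(l.min?.getD 0) = headD0 nm := by
  cases hnm : nm with
  | nil =>
      have hl : l = [] := by
        rw [hnm] at h
        simpa using h.eq_nil
      rw [hl]; simp [headD0]
  | cons x t =>
      rw [hnm] at h hP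
      have hx : l.min? = some (-x) := by
        rw [List.min?_eq_some_iff]
        constructor
        · have : x ∈ l.map (fun x => -x) := h.symm.subset List.mem_cons_self
          obtain ⟨y, hy, hyx⟩ := List.mem_map.mp this
          have : y = -x := by omega
          rwa [← this]
        · intro b hb
          have : -b ∈ l.map (fun x => -x) := List.mem_map.mpr ⟨b, hb, rfl⟩
          have := head_dominates hP (-b) (h.subset this)
          simp [headD0] at this
          omega
      rw [hx]
      simp [headD0]

theorem D_iff (books : List Int) (n m : Int) :
    D_solution books n m ↔
      ((m ≤ ((PySem.List.sorted (books.filter (fun x => decide (0 ≤ x))) (fun x => x) true).length : Int) ∧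
        ((PySem.List.sorted ((books.filter (fun x => decide (x < 0))).map (fun x => -x)) (fun x => x) true).length : Int) < m ∧
        headD0 (PySem.List.sorted (books.filter (fun x => decide (0 ≤ x))) (fun x => x) true) <
          headD0 (PySem.List.sorted ((books.filter (fun x => decide (x < 0))).map (fun x => -x)) (fun x => x) true)) ∨
       (m ≤ ((PySem.List.sorted ((books.filter (fun x => decide (x < 0))).map (fun x => -x)) (fun x => x) true).length : Int) ∧
        ((PySem.List.sorted (books.filter (fun x => decide (0 ≤ x))) (fun x => x) true).length : Int) < m ∧
        headD0 (PySem.List.sorted ((books.filter (fun x => decide (x < 0))).map (fun x => -x)) (fun x => x) true) <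
          headD0 (PySem.List.sorted (books.filter (fun x => decide (0 ≤ x))) (fun x => x) true))) := by
  have hpredneg : books.filter (not ∘ (fun x => decide (0 ≤ x))) = books.filter (fun x => decide (x < 0)) := by
    apply List.filter_congr
    intro x _
    by_cases h : x < 0
    · simp [h, show ¬ (0 ≤ x) by omega]
    · simp [h, show (0 ≤ x) by omega]
  have e1 : (books.filter (fun x => decide (0 ≤ x))).length
      = (PySem.List.sorted (books.filter (fun x => decide (0 ≤ x))) (fun x => x) true).length :=
    ((PySem.List.sorted_perm _ _ _).length_eq).symm
  have e2 : (books.filter (fun x => decide (x < 0))).length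
      = (PySem.List.sorted ((books.filter (fun x => decide (x < 0))).map (fun x => -x)) (fun x => x) true).length := by
    have h := ((PySem.List.sorted_perm ((books.filter (fun x => decide (x < 0))).map (fun x => -x))
        (fun x => x) true).length_eq).symm
    simpa using h
  have e3 : (books.filter (fun x => decide (0 ≤ x))).max?.getD 0
      = headD0 (PySem.List.sorted (books.filter (fun x => decide (0 ≤ x))) (fun x => x) true) :=
    max?_getD_eq_headD0 (PySem.List.sorted_perm _ _ _).symm
      ((PySem.List.sorted_pairwise_rev _ _).imp (fun h => h))
  have e4 : -((books.filter (fun x => decide (x < 0))).min?.getD 0)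
      = headD0 (PySem.List.sorted ((books.filter (fun x => decide (x < 0))).map (fun x => -x)) (fun x => x) true) :=
    neg_min?_getD_eq_headD0 (PySem.List.sorted_perm _ _ _).symm
      ((PySem.List.sorted_pairwise_rev _ _).imp (fun h => h))
  simp only [D_solution, List.partition_eq_filter_filter, hpredneg]
  rw [e3, e4]
  constructor
  · rintro (⟨a, b, c⟩ | ⟨a, b, c⟩)
    · exact Or.inl ⟨by omega, by omega, c⟩
    · exact Or.inr ⟨by omega, by omega, c⟩
  · rintro (⟨a, b, c⟩ | ⟨a, b, c⟩)
    · exact Or.inl ⟨by omega, by omega, c⟩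
    · exact Or.inr ⟨by omega, by omega, c⟩


-- ===== VERDICT (by name: the statement is the Claim_ definition above) =====
theorem solution_spec : Claim_unchanged_solution := by
  intro books n m _ hpre hD
  have hm : 1 ≤ m := hpre
  rw [A_eq_Aval books n m hm, B_eq_Bval books n m hm]
  exact final_eq hm _ _ ((PySem.List.sorted_pairwise_rev _ _).imp (fun h => h))
    ((PySem.List.sorted_pairwise_rev _ _).imp (fun h => h))
    (pm_nonneg books) (nm_nonneg books)
    (by intro hc; exact hD ((D_iff books n m).mpr hc))

theorem solution_changed : Claim_changed_solution := by unfold Claim_changed_solution; decide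

theorem solution_tight : Claim_exact_solution := by
  intro books n m _ hpre hD
  have hm : 1 ≤ m := hpre
  rw [A_eq_Aval books n m hm, B_eq_Bval books n m hm]
  exact final_ne hm _ _ ((PySem.List.sorted_pairwise_rev _ _).imp (fun h => h))
    ((PySem.List.sorted_pairwise_rev _ _).imp (fun h => h))
    (pm_nonneg books) (nm_nonneg books)
    ((D_iff books n m).mp hD)
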